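-- pv_equiv track=rewrite | github.com/JeremyMrzyglocki/NxNxN_solver | solver_v2_5_with_ui.py | create_state_matrix
-- ===== SOURCE A (Python) =====
-- def create_state_matrix(M):
--     region_size = 2 * M
--     rows, cols = 3 * region_size, 4 * region_size
--     face_map = {
--         (0, 1): 1,  (1, 0): 5,  (1, 1): 9,
--         (1, 2): 13, (1, 3): 17, (2, 1): 21,
--     }
--     quad_offset = {(0, 0): 0, (0, 1): 1, (1, 1): 2, (1, 0): 3}
--
--     def ab(qr, qc, ip, jp):
--         if (qr, qc) == (0, 0): return M - jp, M - ip
--         if (qr, qc) == (0, 1): return M - ip, jp + 1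
--         if (qr, qc) == (1, 1): return jp + 1, ip + 1
--         return ip + 1, M - jp
--
--     matrix = []
--     for i in range(rows):
--         rr, ri = divmod(i, region_size)
--         row = []
--         for j in range(cols):
--             rc, ci = divmod(j, region_size)
--             key = (rr, rc)
--             if key in face_map:
--                 base = face_map[key]
--                 br, bc = ri // M, ci // M
--                 k = base + quad_offset[(br, bc)]
--                 a, b = ab(br, bc, ri % M, ci % M)
--                 row.append((k, a, b))
--             else:
--                 row.append(None)
--         matrix.append(row)
--     return matrix
-- ===== SOURCE B (Python) =====
-- def create_state_matrix(M):
--     # Template-tile algorithm: compute ONE 2M x 2M face tile of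
--     # (quadrant_offset, a, b) triples, then stitch the full grid from a
--     # 3x4 face layout, reusing the tile six times with the face's base
--     # sticker index added; non-face regions are blank (None) blocks.
--     tile = (
--         [[(0, M - jp, M - ip) for jp in range(M)]
--          + [(1, M - ip, jp + 1) for jp in range(M)] for ip in range(M)]
--         + [[(3, ip + 1, M - jp) for jp in range(M)]
--            + [(2, jp + 1, ip + 1) for jp in range(M)] for ip in range(M)]
--     )
--     layout = [[None, 1, None, None], [5, 9, 13, 17], [None, 21, None, None]]
--     blank = [None] * (2 * M)
--     matrix = []
--     for band in layout:
--         for trow in tile: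
--             matrix.append([cell for base in band
--                            for cell in (blank if base is None else
--                                         [(base + o, a, b) for (o, a, b) in trow])])
--     return matrix
-- ===== Notes on version B (the rewrite author's own statement) =====
-- stated objective: alternative
-- what changed: B computes a single 2Mx2M template tile of (quadrant-offset,a,b) triples once and stitches the grid from a 3x4 face layout, reusing the tile six times with each face's base added, instead of A's per-cell divmod + dict-membership scan over every grid cell.
import Mathlib
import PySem

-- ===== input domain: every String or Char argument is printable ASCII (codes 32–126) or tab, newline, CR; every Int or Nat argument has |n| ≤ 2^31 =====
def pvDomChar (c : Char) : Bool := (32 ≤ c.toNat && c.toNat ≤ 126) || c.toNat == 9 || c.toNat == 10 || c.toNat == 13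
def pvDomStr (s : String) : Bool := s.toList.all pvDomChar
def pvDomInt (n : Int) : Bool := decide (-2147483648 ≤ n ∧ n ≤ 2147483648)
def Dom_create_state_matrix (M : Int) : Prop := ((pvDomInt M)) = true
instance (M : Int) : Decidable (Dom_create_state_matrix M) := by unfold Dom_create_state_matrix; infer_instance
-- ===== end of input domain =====

-- B builds ONE 2M x 2M template tile of (quadrant-offset, a, b) triples and stitches the
-- grid from a 3x4 face layout, reusing the tile six times with each face's base added,
-- instead of A's per-cell divmod + dict-membership scan; objective: alternative algorithm.

-- ===== PORT A =====
def pvFaceMap : PySem.Dict (Int × Int) Int :=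
  PySem.Dict.ofList [((0,1),1), ((1,0),5), ((1,1),9), ((1,2),13), ((1,3),17), ((2,1),21)]
def pvQuadOffset : PySem.Dict (Int × Int) Int :=
  PySem.Dict.ofList [((0,0),0), ((0,1),1), ((1,1),2), ((1,0),3)]
def pvAb (M qr qc ip jp : Int) : Int × Int :=
  if qr = 0 ∧ qc = 0 then (M - jp, M - ip)
  else if qr = 0 ∧ qc = 1 then (M - ip, jp + 1)
  else if qr = 1 ∧ qc = 1 then (jp + 1, ip + 1)
  else (ip + 1, M - jp)

def create_state_matrix (M : Int) : List (List (Option (Int × Int × Int))) :=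
  let region_size := 2 * M
  let rows := 3 * region_size
  let cols := 4 * region_size
  (PySem.List.pyRange 0 rows 1).foldl (fun matrix i =>
    let rr := PySem.Int.floordiv i region_size
    let ri := PySem.Int.mod i region_size
    let row := (PySem.List.pyRange 0 cols 1).foldl (fun row j =>
      let rc := PySem.Int.floordiv j region_size
      let ci := PySem.Int.mod j region_size
      if pvFaceMap.contains (rr, rc) then
        let base := pvFaceMap.getD (rr, rc) 0
        let br := PySem.Int.floordiv ri M
        let bc := PySem.Int.floordiv ci M
        let k := base + pvQuadOffset.getD (br, bc) 0
        let ab := pvAb M br bc (PySem.Int.mod ri M) (PySem.Int.mod ci M)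
        row ++ [some (k, ab.1, ab.2)]
      else row ++ [none]) []
    matrix ++ [row]) []

-- ===== PORT B =====
-- 'tile': the two stacked list comprehensions of Source B (top M rows, then bottom M rows),
-- each row the concatenation of its two quadrant halves.
def pvTile (M : Int) : List (List (Int × Int × Int)) :=
  (PySem.List.pyRange 0 M 1).map (fun ip =>
    (PySem.List.pyRange 0 M 1).map (fun jp => ((0 : Int), M - jp, M - ip)) ++
    (PySem.List.pyRange 0 M 1).map (fun jp => ((1 : Int), M - ip, jp + 1))) ++
  (PySem.List.pyRange 0 M 1).map (fun ip =>
    (PySem.List.pyRange 0 M 1).map (fun jp => ((3 : Int), ip + 1, M - jp)) ++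
    (PySem.List.pyRange 0 M 1).map (fun jp => ((2 : Int), jp + 1, ip + 1)))
def pvLayout : List (List (Option Int)) :=
  [[none, some 1, none, none], [some 5, some 9, some 13, some 17], [none, some 21, none, none]]
def pvBlank (M : Int) : List (Option (Int × Int × Int)) :=
  List.replicate (2 * M).toNat none

-- the double 'for band / for trow: matrix.append(...)' loop; the row comprehension
-- '[cell for base in band for cell in (blank if base is None else [...])]' is the flatMap.
def create_state_matrix_alt (M : Int) : List (List (Option (Int × Int × Int))) :=
  pvLayout.foldl (fun matrix band =>
    (pvTile M).foldl (fun matrix trow =>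
      matrix ++ [band.flatMap (fun base =>
        base.elim (pvBlank M)
          (fun b => trow.map (fun t => some (b + t.1, t.2.1, t.2.2))))]) matrix) []

-- ===== PRECONDITION & SPEC =====
def Spec_create_state_matrix (M : Int) (out : List (List (Option (Int × Int × Int)))) : Prop := out = create_state_matrix_alt M
instance (M : Int) (out : List (List (Option (Int × Int × Int)))) : Decidable (Spec_create_state_matrix M out) := by unfold Spec_create_state_matrix; infer_instance

-- ===== CLAIM (what is proved, stated in full; the proofs are below) =====
def Claim_equal_create_state_matrix : Prop := ∀ (M : Int), Dom_create_state_matrix M → Spec_create_state_matrix M (create_state_matrix M)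

-- ===== LEMMAS AND PROOFS =====

-- generic range lemmas
theorem map_pyRange_shift {α : Type} (a b : Int) (f : Int → α) :
    (PySem.List.pyRange a (a+b) 1).map f = (PySem.List.pyRange 0 b 1).map (fun r => f (a + r)) := by
  rw [PySem.List.pyRange_one, PySem.List.pyRange_one]
  simp [List.map_map, Function.comp_def]

theorem map_pyRange_mul {α : Type} (b : Int) (hb : 0 ≤ b) (f : Int → α) (n : Int) (hn : 0 ≤ n) :
    (PySem.List.pyRange 0 (n*b) 1).map f =
      (PySem.List.pyRange 0 n 1).flatMap (fun q => (PySem.List.pyRange 0 b 1).map (fun r => f (q*b + r))) := by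
  induction n, hn using Int.le_induction with
  | base =>
      rw [show (0:Int)*b = 0 by ring]
      simp [PySem.List.pyRange_one_eq_nil (le_refl (0:Int))]
  | succ n hn ih =>
      rw [PySem.List.pyRange_one_succ_right hn, show (n+1)*b = n*b + b by ring,
        PySem.List.pyRange_one_append 0 (n*b) (n*b+b) (by positivity) (by omega)]
      simp only [List.map_append, List.flatMap_append, ih, List.flatMap_cons, List.flatMap_nil,
        List.append_nil, map_pyRange_shift]

theorem ite_append {α : Type} (c : Prop) [Decidable c] (row : List α) (a b : α) :
    (if c then row ++ [a] else row ++ [b]) = row ++ [if c then a else b] := by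
  split <;> rfl

theorem fd_mod (q r b : Int) (hb : 0 < b) (h0 : 0 ≤ r) (hr : r < b) :
    PySem.Int.floordiv (q*b + r) b = q ∧ PySem.Int.mod (q*b + r) b = r := by
  have h1 : PySem.Int.floordiv (q*b+r) b = q := by
    rw [PySem.Int.floordiv_eq_iff_of_pos hb]
    constructor <;> nlinarith
  refine ⟨h1, ?_⟩
  have h2 := PySem.Int.floordiv_mul_add_mod (q*b+r) b
  rw [h1] at h2
  linarith

-- A's per-cell computation, named
def cellA (M rr ri j : Int) : Option (Int × Int × Int) :=
  let rc := PySem.Int.floordiv j (2*M)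
  let ci := PySem.Int.mod j (2*M)
  if pvFaceMap.contains (rr, rc) then
    let base := pvFaceMap.getD (rr, rc) 0
    let br := PySem.Int.floordiv ri M
    let bc := PySem.Int.floordiv ci M
    let k := base + pvQuadOffset.getD (br, bc) 0
    let ab := pvAb M br bc (PySem.Int.mod ri M) (PySem.Int.mod ci M)
    some (k, ab.1, ab.2)
  else none

theorem A_canon (M : Int) :
    create_state_matrix M =
      (PySem.List.pyRange 0 (3*(2*M)) 1).map (fun i =>
        (PySem.List.pyRange 0 (4*(2*M)) 1).map (fun j =>
          cellA M (PySem.Int.floordiv i (2*M)) (PySem.Int.mod i (2*M)) j)) := by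
  simp only [create_state_matrix, cellA, ite_append,
    PySem.List.foldl_append_singleton_eq_map, List.nil_append]

-- FF: the common nested flatMap normal form both ports are reduced to
def pvInner (M rr br ip : Int) : List (Option (Int × Int × Int)) :=
  (PySem.List.pyRange 0 4 1).flatMap (fun rc =>
    (pvFaceMap.get? (rr, rc)).elim
      (List.replicate (2 * M).toNat none)
      (fun base =>
        (PySem.List.pyRange 0 2 1).flatMap (fun bc =>
          (PySem.List.pyRange 0 M 1).map (fun jp =>
            some (base + pvQuadOffset.getD (br, bc) 0,
              (pvAb M br bc ip jp).1, (pvAb M br bc ip jp).2)))))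

def FF (M : Int) : List (List (Option (Int × Int × Int))) :=
  (PySem.List.pyRange 0 3 1).flatMap (fun rr =>
    (PySem.List.pyRange 0 2 1).flatMap (fun br =>
      (PySem.List.pyRange 0 M 1).map (fun ip => pvInner M rr br ip)))

theorem cellA_eval (M rr br ip rc bc jp : Int) (hM : 0 < M)
    (hbc0 : 0 ≤ bc) (hbc1 : bc < 2)
    (hip0 : 0 ≤ ip) (hip1 : ip < M) (hjp0 : 0 ≤ jp) (hjp1 : jp < M) :
    cellA M rr (br*M + ip) (rc*(2*M) + (bc*M + jp)) =
      (pvFaceMap.get? (rr, rc)).elim none (fun base =>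
        some (base + pvQuadOffset.getD (br, bc) 0, (pvAb M br bc ip jp).1, (pvAb M br bc ip jp).2)) := by
  have hci0 : (0:Int) ≤ bc*M + jp := by nlinarith
  have hci1 : bc*M + jp < 2*M := by nlinarith
  have h1 := fd_mod rc (bc*M+jp) (2*M) (by omega) hci0 hci1
  have h2 := fd_mod bc jp M hM hjp0 hjp1
  have h3 := fd_mod br ip M hM hip0 hip1
  unfold cellA
  simp only [h1.1, h1.2, h2.1, h2.2, h3.1, h3.2]
  rw [PySem.Dict.contains_eq_isSome_get?]
  cases h : pvFaceMap.get? (rr, rc) with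
  | none => simp only [Option.isSome_none, Bool.false_eq_true, if_false, Option.elim_none]
  | some base => simp [PySem.Dict.getD_eq_get?_getD, h]

theorem map_const_none (M : Int) :
    (PySem.List.pyRange 0 M 1).map (fun _ => (none : Option (Int × Int × Int))) =
      List.replicate M.toNat none := by
  rw [PySem.List.pyRange_one]
  simp [Function.comp_def, List.map_const']

theorem A_eq_FF (M : Int) : create_state_matrix M = FF M := by
  rcases (by omega : M ≤ 0 ∨ 0 < M) with hM | hM
  · rw [A_canon]
    unfold FF
    rw [PySem.List.pyRange_one_eq_nil (by omega : 3*(2*M) ≤ 0),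
        PySem.List.pyRange_one_eq_nil (by omega : M ≤ 0)]
    simp
  · rw [A_canon]
    unfold FF pvInner
    rw [map_pyRange_mul (2*M) (by omega) _ 3 (by omega)]
    apply List.flatMap_congr
    intro rr hrr
    rw [map_pyRange_mul M (by omega) _ 2 (by omega)]
    apply List.flatMap_congr
    intro br hbr
    apply List.map_congr_left
    intro ip hip
    rw [PySem.List.mem_pyRange_one] at hrr hbr hip
    have hri0 : (0:Int) ≤ br*M + ip := by nlinarith
    have hri1 : br*M + ip < 2*M := by nlinarith
    have h := fd_mod rr (br*M+ip) (2*M) (by omega) hri0 hri1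
    rw [h.1, h.2]
    rw [map_pyRange_mul (2*M) (by omega) _ 4 (by omega)]
    apply List.flatMap_congr
    intro rc hrc
    cases hface : pvFaceMap.get? (rr, rc) with
    | none =>
        rw [map_pyRange_mul M (by omega) _ 2 (by omega)]
        have : ∀ bc ∈ PySem.List.pyRange 0 2 1,
            (PySem.List.pyRange 0 M 1).map (fun jp =>
              cellA M rr (br*M + ip) (rc*(2*M) + (bc*M + jp))) =
            List.replicate M.toNat (none : Option (Int × Int × Int)) := by
          intro bc hbc
          rw [PySem.List.mem_pyRange_one] at hbc
          have hmap : (PySem.List.pyRange 0 M 1).map (fun jp =>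
              cellA M rr (br*M + ip) (rc*(2*M) + (bc*M + jp))) =
              (PySem.List.pyRange 0 M 1).map (fun _ => (none : Option (Int × Int × Int))) := by
            apply List.map_congr_left
            intro jp hjp
            rw [PySem.List.mem_pyRange_one] at hjp
            rw [cellA_eval M rr br ip rc bc jp hM hbc.1 hbc.2 hip.1 hip.2 hjp.1 hjp.2,
              hface, Option.elim_none]
          rw [hmap]
          exact map_const_none M
        rw [List.flatMap_congr this]
        rw [show PySem.List.pyRange 0 2 1 = [0,1] from by decide]
        simp only [List.flatMap_cons, List.flatMap_nil, List.append_nil, Option.elim]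
        rw [← List.replicate_add]
        congr 1
        omega
    | some base =>
        rw [map_pyRange_mul M (by omega) _ 2 (by omega)]
        simp only [Option.elim]
        apply List.flatMap_congr
        intro bc hbc
        rw [PySem.List.mem_pyRange_one] at hbc
        apply List.map_congr_left
        intro jp hjp
        rw [PySem.List.mem_pyRange_one] at hjp
        rw [cellA_eval M rr br ip rc bc jp hM hbc.1 hbc.2 hip.1 hip.2 hjp.1 hjp.2,
          hface]
        rfl

-- ===== B side: reduce the fold/stitch program to FF =====

def pvRowOf (M : Int) (band : List (Option Int)) (trow : List (Int × Int × Int)) :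
    List (Option (Int × Int × Int)) :=
  band.flatMap (fun base =>
    base.elim (pvBlank M) (fun b => trow.map (fun t => some (b + t.1, t.2.1, t.2.2))))

theorem B_canon (M : Int) :
    create_state_matrix_alt M =
      pvLayout.flatMap (fun band => (pvTile M).map (pvRowOf M band)) := by
  unfold create_state_matrix_alt pvRowOf pvLayout
  simp only [List.foldl_cons, List.foldl_nil, PySem.List.foldl_append_singleton_eq_map,
    List.flatMap_cons, List.flatMap_nil, List.append_nil, List.nil_append, List.append_assoc]

def pvBandOf (rr : Int) : List (Option Int) :=
  (PySem.List.pyRange 0 4 1).map (fun rc => pvFaceMap.get? (rr, rc))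

-- the two tile-row shapes of Source B, named for the proof
def pvTopRow (M ip : Int) : List (Int × Int × Int) :=
  (PySem.List.pyRange 0 M 1).map (fun jp => ((0 : Int), M - jp, M - ip)) ++
  (PySem.List.pyRange 0 M 1).map (fun jp => ((1 : Int), M - ip, jp + 1))
def pvBotRow (M ip : Int) : List (Int × Int × Int) :=
  (PySem.List.pyRange 0 M 1).map (fun jp => ((3 : Int), ip + 1, M - jp)) ++
  (PySem.List.pyRange 0 M 1).map (fun jp => ((2 : Int), jp + 1, ip + 1))

theorem pvTile_eq (M : Int) :
    pvTile M = (PySem.List.pyRange 0 M 1).map (pvTopRow M) ++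
               (PySem.List.pyRange 0 M 1).map (pvBotRow M) := rfl

theorem seg_top (M rr ip rc : Int) :
    (pvFaceMap.get? (rr, rc)).elim
      (List.replicate (2 * M).toNat (none : Option (Int × Int × Int)))
      (fun base =>
        (PySem.List.pyRange 0 2 1).flatMap (fun bc =>
          (PySem.List.pyRange 0 M 1).map (fun jp =>
            some (base + pvQuadOffset.getD (0, bc) 0,
              (pvAb M 0 bc ip jp).1, (pvAb M 0 bc ip jp).2)))) =
    (pvFaceMap.get? (rr, rc)).elim (pvBlank M)
      (fun b => (pvTopRow M ip).map (fun t => some (b + t.1, t.2.1, t.2.2))) := by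
  cases pvFaceMap.get? (rr, rc) with
  | none => rfl
  | some base =>
      simp only [Option.elim, pvTopRow, List.map_append, List.map_map]
      rw [show PySem.List.pyRange 0 2 1 = [0,1] from by decide]
      simp only [List.flatMap_cons, List.flatMap_nil, List.append_nil]
      congr 1

theorem seg_bot (M rr ip rc : Int) :
    (pvFaceMap.get? (rr, rc)).elim
      (List.replicate (2 * M).toNat (none : Option (Int × Int × Int)))
      (fun base =>
        (PySem.List.pyRange 0 2 1).flatMap (fun bc =>
          (PySem.List.pyRange 0 M 1).map (fun jp =>
            some (base + pvQuadOffset.getD (1, bc) 0,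
              (pvAb M 1 bc ip jp).1, (pvAb M 1 bc ip jp).2)))) =
    (pvFaceMap.get? (rr, rc)).elim (pvBlank M)
      (fun b => (pvBotRow M ip).map (fun t => some (b + t.1, t.2.1, t.2.2))) := by
  cases pvFaceMap.get? (rr, rc) with
  | none => rfl
  | some base =>
      simp only [Option.elim, pvBotRow, List.map_append, List.map_map]
      rw [show PySem.List.pyRange 0 2 1 = [0,1] from by decide]
      simp only [List.flatMap_cons, List.flatMap_nil, List.append_nil]
      congr 1

theorem row_top (M rr ip : Int) :
    pvInner M rr 0 ip = pvRowOf M (pvBandOf rr) (pvTopRow M ip) := by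
  unfold pvInner pvRowOf pvBandOf
  rw [List.flatMap_map]
  apply List.flatMap_congr
  intro rc _
  exact seg_top M rr ip rc

theorem row_bot (M rr ip : Int) :
    pvInner M rr 1 ip = pvRowOf M (pvBandOf rr) (pvBotRow M ip) := by
  unfold pvInner pvRowOf pvBandOf
  rw [List.flatMap_map]
  apply List.flatMap_congr
  intro rc _
  exact seg_bot M rr ip rc

theorem band_block (M rr : Int) :
    (PySem.List.pyRange 0 2 1).flatMap (fun br =>
      (PySem.List.pyRange 0 M 1).map (fun ip => pvInner M rr br ip)) =
    (pvTile M).map (pvRowOf M (pvBandOf rr)) := by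
  rw [pvTile_eq, List.map_append,
    show PySem.List.pyRange 0 2 1 = [0,1] from by decide]
  simp only [List.map_map]
  simp only [List.flatMap_cons, List.flatMap_nil, List.append_nil]
  congr 1
  · apply List.map_congr_left; intro ip _; exact row_top M rr ip
  · apply List.map_congr_left; intro ip _; exact row_bot M rr ip

theorem FF_eq_B (M : Int) : FF M = create_state_matrix_alt M := by
  rw [B_canon]
  unfold FF
  rw [show PySem.List.pyRange 0 3 1 = [0,1,2] from by decide,
    show pvLayout = [pvBandOf 0, pvBandOf 1, pvBandOf 2] from by decide]
  simp only [List.flatMap_cons, List.flatMap_nil, List.append_nil]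
  rw [band_block M 0, band_block M 1, band_block M 2]

-- ===== VERDICT (by name: the statement is the Claim_ definition above) =====
theorem create_state_matrix_spec : Claim_equal_create_state_matrix := by
  intro M _
  exact (A_eq_FF M).trans (FF_eq_B M)
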